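-- pv_equiv track=rewrite | github.com/akiofujitani/PyAutomations | py_automations/edging_config.py | count_columns
-- ===== SOURCE A (Python) =====
-- def count_columns(matrix_pos: list, combination_list: list):
--     r'''
--     Count the most present column combination in matrix
--     '''
--     most_present_counter = 0
--     most_present = ''
--     for combination in combination_list:
--         counter = 0
--         if len(combination) > 0:
--             for row in matrix_pos:
--                 if all(item in row for item in combination):
--                     counter += 1
--         if counter >= most_present_counter and len(combination) >= len(most_present):
--             most_present_counter = counter
--             most_present = combination
--     return most_present
-- ===== SOURCE B (Python) =====
-- def count_columns(matrix_pos: list, combination_list: list):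
--     r'''
--     Count the most present column combination in matrix
--     '''
--     # Build an inverted index once: character -> set of row indices containing it.
--     index = {}
--     for i, row in enumerate(matrix_pos):
--         for ch in row:
--             index.setdefault(ch, set()).add(i)
--     most_present_counter = 0
--     most_present = ''
--     for combination in combination_list:
--         counter = 0
--         if len(combination) > 0:
--             common = index.get(combination[0], set())
--             for ch in combination[1:]:
--                 common = common & index.get(ch, set())
--             counter = len(common)
--         if counter >= most_present_counter and len(combination) >= len(most_present):
--             most_present_counter = counter
--             most_present = combination
--     return most_present
-- ===== Notes on version B (the rewrite author's own statement) =====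
-- stated objective: faster
-- what changed: Replaces the per-combination scan of all matrix rows (substring test per character per row) by an inverted index built once (char -> set of row indices); each combination's count is then the size of an intersection of index sets.
import Mathlib
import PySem

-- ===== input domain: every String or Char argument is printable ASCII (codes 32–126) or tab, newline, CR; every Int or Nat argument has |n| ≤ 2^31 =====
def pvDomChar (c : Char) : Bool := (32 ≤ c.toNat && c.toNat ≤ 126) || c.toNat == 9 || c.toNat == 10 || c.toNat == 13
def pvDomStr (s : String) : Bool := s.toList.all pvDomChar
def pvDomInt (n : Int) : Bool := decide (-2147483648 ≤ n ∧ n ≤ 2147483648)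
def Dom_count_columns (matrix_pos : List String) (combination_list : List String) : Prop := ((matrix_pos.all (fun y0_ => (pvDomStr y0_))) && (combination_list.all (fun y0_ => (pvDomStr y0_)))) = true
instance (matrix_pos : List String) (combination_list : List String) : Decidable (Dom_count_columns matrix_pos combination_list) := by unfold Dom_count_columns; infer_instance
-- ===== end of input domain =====

-- B replaces A's per-combination scan of all rows by an inverted index (char -> set of
-- row indices) built once; a combination's count is the size of an intersection of index sets.

-- ===== PORT A =====
-- literal transliteration of A: state (most_present_counter, most_present); 'item in row'
-- for a single character is character membership in the row's characters
def count_columns (matrix_pos : List String) (combination_list : List String) : String :=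
  (combination_list.foldl
    (fun (st : Nat × String) combination =>
      let counter : Nat :=
        if 0 < combination.toList.length then
          matrix_pos.foldl
            (fun c row =>
              if combination.toList.all (fun item => row.toList.contains item) then c + 1 else c)
            0
        else 0
      if counter ≥ st.1 ∧ combination.toList.length ≥ st.2.toList.length then (counter, combination)
      else st)
    (0, "")).2

-- ===== PORT B =====
-- inverted index of Source B: for i, row in enumerate(matrix_pos): for ch in row: index.setdefault(ch, set()).add(i)
def cc_index (matrix_pos : List String) : PySem.Dict Char (PySem.Set Int) :=
  (PySem.List.enumerate matrix_pos 0).foldl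
    (fun d p => p.2.toList.foldl
      (fun d ch => PySem.Dict.modify d ch [] (fun s => PySem.Set.add s p.1)) d)
    PySem.Dict.empty

def count_columns_alt (matrix_pos : List String) (combination_list : List String) : String :=
  let index := cc_index matrix_pos
  (combination_list.foldl
    (fun (st : Nat × String) combination =>
      let counter : Nat :=
        match combination.toList with
        | [] => 0
        | c :: cs =>
          (cs.foldl (fun s ch => PySem.Set.inter s (PySem.Dict.getD index ch []))
            (PySem.Dict.getD index c [])).length
      if counter ≥ st.1 ∧ combination.toList.length ≥ st.2.toList.length then (counter, combination)
      else st)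
    (0, "")).2

-- ===== PRECONDITION & SPEC =====
def Spec_count_columns (matrix_pos : List String) (combination_list : List String) (out : String) : Prop := out = count_columns_alt matrix_pos combination_list
instance (matrix_pos : List String) (combination_list : List String) (out : String) : Decidable (Spec_count_columns matrix_pos combination_list out) := by unfold Spec_count_columns; infer_instance

-- ===== CLAIM (what is proved, stated in full; the proofs are below) =====
def Claim_equal_count_columns : Prop := ∀ (matrix_pos : List String) (combination_list : List String), Dom_count_columns matrix_pos combination_list → Spec_count_columns matrix_pos combination_list (count_columns matrix_pos combination_list)

-- ===== LEMMAS AND PROOFS =====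

-- the row indices (counted from s) of rows containing every character of chars
def ccHits (rows : List String) (s : Int) (chars : List Char) : List Int :=
  match rows with
  | [] => []
  | r :: rs =>
    (if chars.all (fun ch => r.toList.contains ch) then [s] else []) ++ ccHits rs (s + 1) chars

theorem ccHits_lb {rows : List String} {s i : Int} {chars : List Char}
    (h : i ∈ ccHits rows s chars) : s ≤ i := by
  induction rows generalizing s with
  | nil => simp [ccHits] at h
  | cons r rs ih =>
    simp only [ccHits, List.mem_append] at h
    rcases h with h | h
    · split at h <;> simp_all
    · have := ih h; omega

theorem ccHits_nodup (rows : List String) (s : Int) (chars : List Char) :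
    (ccHits rows s chars).Nodup := by
  induction rows generalizing s with
  | nil => simp [ccHits]
  | cons r rs ih =>
    simp only [ccHits]
    refine List.Nodup.append ?_ (ih (s + 1)) ?_
    · split <;> simp
    · intro a ha hb
      have h2 := ccHits_lb hb
      have : a = s := by split at ha <;> simp_all
      omega

theorem mem_ccHits_append (rows : List String) (s : Int) (c1 c2 : List Char) (i : Int) :
    i ∈ ccHits rows s (c1 ++ c2) ↔ i ∈ ccHits rows s c1 ∧ i ∈ ccHits rows s c2 := by
  induction rows generalizing s with
  | nil => simp [ccHits]
  | cons r rs ih =>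
    have hlb : ∀ chars, i ∈ ccHits rs (s + 1) chars → ¬ i = s := by
      intro chars hmem
      have := ccHits_lb hmem; omega
    have n1 : i ∈ ccHits rs (s + 1) c1 → ¬ i = s := hlb c1
    have n2 : i ∈ ccHits rs (s + 1) c2 → ¬ i = s := hlb c2
    simp only [ccHits, List.mem_append, List.all_append, Bool.and_eq_true, ih]
    by_cases h1 : c1.all (fun ch => r.toList.contains ch) = true <;>
      by_cases h2 : c2.all (fun ch => r.toList.contains ch) = true <;>
        simp <;> tauto

-- membership in the intersection fold of B
theorem mem_inter_foldl (cs : List Char) (g : Char → List Int) (acc : List Int) (i : Int) :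
    i ∈ cs.foldl (fun s ch => PySem.Set.inter s (g ch)) acc ↔
      i ∈ acc ∧ ∀ ch ∈ cs, i ∈ g ch := by
  induction cs generalizing acc with
  | nil => simp
  | cons c cs ih =>
    simp only [List.foldl_cons, ih, PySem.Set.mem_inter, List.mem_cons]
    constructor
    · rintro ⟨⟨h1, h2⟩, h3⟩
      exact ⟨h1, by rintro ch (rfl | hm); exacts [h2, h3 ch hm]⟩
    · rintro ⟨h1, h2⟩
      exact ⟨⟨h1, h2 c (Or.inl rfl)⟩, fun ch hm => h2 ch (Or.inr hm)⟩

theorem nodup_inter_foldl (cs : List Char) (g : Char → List Int) (acc : List Int)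
    (h : acc.Nodup) :
    (cs.foldl (fun s ch => PySem.Set.inter s (g ch)) acc).Nodup := by
  induction cs generalizing acc with
  | nil => simpa
  | cons c cs ih => exact ih _ (PySem.Set.nodup_inter _ _ h)

-- effect of one row's inner loop on the index
theorem cc_inner_getD (cs : List Char) (d : PySem.Dict Char (PySem.Set Int)) (i : Int) (ch : Char) :
    (cs.foldl (fun d ch' => PySem.Dict.modify d ch' [] (fun s => PySem.Set.add s i)) d).getD ch []
      = if ch ∈ cs then PySem.Set.add (d.getD ch []) i else d.getD ch [] := by
  induction cs generalizing d with
  | nil => simp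
  | cons c cs ih =>
    simp only [List.foldl_cons, ih, PySem.Dict.getD_modify, List.mem_cons]
    by_cases hc : ch = c
    · subst hc
      by_cases hm : ch ∈ cs <;> simp [hm, PySem.Set.add_of_mem, PySem.Set.mem_add]
    · by_cases hm : ch ∈ cs <;> simp [hc, hm]

-- the built index maps each character to exactly its hit list
theorem cc_build_getD_aux (rows : List String) (s : Int) (d : PySem.Dict Char (PySem.Set Int))
    (g : Char → List Int)
    (hg : ∀ ch, d.getD ch [] = g ch)
    (hb : ∀ ch i, i ∈ g ch → i < s) (ch : Char) :
    ((PySem.List.enumerate rows s).foldl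
      (fun d p => p.2.toList.foldl
        (fun d ch' => PySem.Dict.modify d ch' [] (fun t => PySem.Set.add t p.1)) d) d).getD ch []
      = g ch ++ ccHits rows s [ch] := by
  induction rows generalizing s d g with
  | nil => simp [PySem.List.enumerate_nil, hg]; rfl
  | cons r rs ih =>
    rw [PySem.List.enumerate_cons, List.foldl_cons]
    have step := cc_inner_getD r.toList d s
    have hnew : ∀ ch', (r.toList.foldl
        (fun d ch' => PySem.Dict.modify d ch' [] (fun t => PySem.Set.add t s)) d).getD ch' []
        = (fun ch' => if ch' ∈ r.toList then g ch' ++ [s] else g ch') ch' := by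
      intro ch'
      rw [cc_inner_getD]
      by_cases hm : ch' ∈ r.toList
      · simp only [hm, if_true, hg]
        exact PySem.Set.add_of_not_mem (fun hmem => absurd (hb ch' s hmem) (by omega))
      · simp [hm, hg]
    have hbnew : ∀ ch' i, i ∈ (fun ch' => if ch' ∈ r.toList then g ch' ++ [s] else g ch') ch' → i < s + 1 := by
      intro ch' i hmem
      by_cases hm : ch' ∈ r.toList <;> simp [hm] at hmem
      · rcases hmem with hmem | rfl
        · have := hb ch' i hmem; omega
        · omega
      · have := hb ch' i hmem; omega
    rw [ih (s + 1) _ _ hnew hbnew]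
    simp only [ccHits]
    by_cases hm : ch ∈ r.toList <;> simp [hm, List.append_assoc]

theorem cc_index_getD (rows : List String) (ch : Char) :
    (cc_index rows).getD ch [] = ccHits rows 0 [ch] := by
  have := cc_build_getD_aux rows 0 PySem.Dict.empty (fun _ => [])
    (fun ch => by simp) (fun ch i h => by simp at h) ch
  simpa [cc_index] using this

-- single-character hit lists are nodup (special case used for the fold start)
theorem ccHits_mem_single_all (rows : List String) (i : Int) (c : Char) (cs : List Char) :
    i ∈ ccHits rows 0 (c :: cs) ↔
      i ∈ ccHits rows 0 [c] ∧ ∀ ch ∈ cs, i ∈ ccHits rows 0 [ch] := by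
  induction cs using List.reverseRecOn generalizing c with
  | nil => simp
  | append_singleton cs ch ih =>
    have h1 : c :: (cs ++ [ch]) = (c :: cs) ++ [ch] := by simp
    rw [h1, mem_ccHits_append, ih]
    constructor
    · rintro ⟨⟨h1, h2⟩, h3⟩
      refine ⟨h1, ?_⟩
      intro x hx
      rcases List.mem_append.mp hx with hx | hx
      · exact h2 x hx
      · simp at hx; subst hx; exact h3
    · rintro ⟨h1, h2⟩
      exact ⟨⟨h1, fun x hx => h2 x (List.mem_append.mpr (Or.inl hx))⟩,
        h2 ch (List.mem_append.mpr (Or.inr (by simp)))⟩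

-- A's row-count loop counts the hit list
theorem cc_count_eq_hits (rows : List String) (s : Int) (chars : List Char) (a : Nat) :
    rows.foldl
      (fun c row => if chars.all (fun item => row.toList.contains item) then c + 1 else c) a
      = a + (ccHits rows s chars).length := by
  induction rows generalizing s a with
  | nil => simp [ccHits]
  | cons r rs ih =>
    by_cases hr : chars.all (fun ch => r.toList.contains ch) = true <;>
      simp only [List.foldl_cons, ccHits, hr, if_true, if_false, List.length_append,
        List.length_singleton, List.length_nil, Bool.false_eq_true]
    · rw [ih (s + 1) (a + 1)]; omega
    · rw [ih (s + 1) a]; omega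

-- the per-combination counters of A and B agree
theorem cc_counter_eq (matrix_pos : List String) (combination : String) :
    (if 0 < combination.toList.length then
      matrix_pos.foldl
        (fun c row =>
          if combination.toList.all (fun item => row.toList.contains item) then c + 1 else c) 0
     else 0)
    = (match combination.toList with
      | [] => 0
      | c :: cs =>
        (cs.foldl (fun s ch => PySem.Set.inter s (PySem.Dict.getD (cc_index matrix_pos) ch []))
          (PySem.Dict.getD (cc_index matrix_pos) c [])).length) := by
  cases h : combination.toList with
  | nil => simp
  | cons c cs =>
    simp only [List.length_cons, Nat.zero_lt_succ, if_pos]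
    rw [cc_count_eq_hits matrix_pos 0 (c :: cs) 0, Nat.zero_add]
    have hperm : (cs.foldl (fun s ch => PySem.Set.inter s (PySem.Dict.getD (cc_index matrix_pos) ch []))
        (PySem.Dict.getD (cc_index matrix_pos) c [])).Perm (ccHits matrix_pos 0 (c :: cs)) := by
      apply (List.perm_ext_iff_of_nodup ?_ ?_).mpr
      · intro i
        rw [mem_inter_foldl]
        simp only [cc_index_getD]
        exact (ccHits_mem_single_all matrix_pos i c cs).symm
      · exact nodup_inter_foldl _ _ _ (by rw [cc_index_getD]; exact (ccHits_nodup _ _ _))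
      · exact ccHits_nodup _ _ _
    exact (hperm.length_eq).symm

-- ===== VERDICT (by name: the statement is the Claim_ definition above) =====
theorem count_columns_spec : Claim_equal_count_columns := by
  intro matrix_pos combination_list _
  unfold Spec_count_columns count_columns count_columns_alt
  congr 1
  apply List.foldl_ext
  intro st combination _
  simp only [cc_counter_eq matrix_pos combination]
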